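-- pv_equiv track=rewrite | github.com/break11/AutoStorage | Lib/Common/ModbusConnector_Funcs.py | pack_register_cache
-- ===== SOURCE A (Python) =====
-- from collections import namedtuple
-- from itertools import groupby
--
-- regPacket = namedtuple( "regPacket", "start count vals", defaults = (0, 0, None) )
--
-- def pack_register_cache( cache_dict ):
--     packed_cache = []
--     regiser_addresses = sorted( cache_dict.keys() )
--
--     # пример regiser_addresses = [ 0, 1, 2, 13, 14, 15 ]
--     # группировка адресов в контейнере вида [ (0, [(0,0)(1,1)(2,2)]), (-10, [(3,13)(4,14)(5,15)]) ]
--     # ключ группировки (здесь 0 и -10 ) - разница между значением адреса и позицией в списке regiser_addresses: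
--     address_groups = groupby( enumerate(regiser_addresses), lambda x: x[0]-x[1] )
--     # приведение группировки к списку вида [ [1,2,3], [13,14,15] ]:
--     address_groups = [ [e[1] for e in vals] for key, vals in address_groups ]
--
--     for group in address_groups:
--         vals = [ cache_dict[addr] for addr in group ]
--         packet = regPacket( start=group[0], count=len(group), vals=vals )
--         packed_cache.append( packet )
--
--     return packed_cache
-- ===== SOURCE B (Python) =====
-- def pack_register_cache(cache_dict):
--     # Hash-based consecutive grouping: a packet starts exactly at an address a
--     # with a-1 absent from the dict; extend each start forward by membership tests.
--     packets = []
--     for a in sorted(x for x in cache_dict if x - 1 not in cache_dict):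
--         vals = []
--         cur = a
--         while cur in cache_dict:
--             vals.append(cache_dict[cur])
--             cur += 1
--         packets.append((a, cur - a, vals))
--     return packets
-- ===== Notes on version B (the rewrite author's own statement) =====
-- stated objective: alternative
-- what changed: Instead of sorting all addresses and splitting the sorted sequence into runs via groupby over enumerate, B detects run starts by hash membership (a is a start iff a-1 is not a key), sorts only those starts, and grows each packet forward with 'cur in dict' lookups (the classic hash-based consecutive-sequence grouping).
import Mathlib
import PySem

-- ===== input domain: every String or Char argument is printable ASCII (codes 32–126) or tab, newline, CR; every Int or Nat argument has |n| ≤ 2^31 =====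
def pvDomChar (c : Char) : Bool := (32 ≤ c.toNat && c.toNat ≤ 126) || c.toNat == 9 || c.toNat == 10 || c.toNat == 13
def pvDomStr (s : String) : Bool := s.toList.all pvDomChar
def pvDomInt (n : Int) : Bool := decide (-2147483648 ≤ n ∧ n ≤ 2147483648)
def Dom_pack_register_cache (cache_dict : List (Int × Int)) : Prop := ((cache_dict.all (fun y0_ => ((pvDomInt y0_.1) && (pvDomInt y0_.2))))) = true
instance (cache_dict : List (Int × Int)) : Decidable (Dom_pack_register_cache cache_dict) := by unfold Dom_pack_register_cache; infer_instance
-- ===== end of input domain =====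

-- B groups by hash membership (run starts = keys whose predecessor is absent, grown forward
-- by dict lookups) instead of A's sort-everything + groupby(enumerate, i-v) pass (objective: alternative).

-- ===== PORT A =====
-- groupby( enumerate(addrs), lambda x: x[0]-x[1] ) followed by the list comprehension
-- [ [e[1] for e in vals] for key, vals in groups ]: each group is the maximal prefix
-- sharing the key value index - address.
def pvGroupby : List (Int × Int) → List (List Int)
  | [] => []
  | (i, a) :: rest =>
    (a :: (rest.takeWhile (fun p => p.1 - p.2 == i - a)).map (·.2)) ::
      pvGroupby (rest.dropWhile (fun p => p.1 - p.2 == i - a))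
termination_by l => l.length
decreasing_by
  simp only [List.length_cons]
  exact Nat.lt_succ_of_le (List.length_dropWhile_le _ _)

def pack_register_cache (cache_dict : List (Int × Int)) : List (Int × Int × List Int) :=
  let d := PySem.Dict.ofList cache_dict
  let regiser_addresses := PySem.List.sorted d.keys (fun x => x) false
  let address_groups := pvGroupby (PySem.List.enumerate regiser_addresses 0)
  address_groups.foldl
    (fun packed_cache group =>
      packed_cache ++ [(group.headD 0, (group.length : Int),
                        group.map (fun addr => PySem.Dict.getD d addr 0))]) []

-- ===== PORT B =====
-- the while loop 'while cur in cache_dict: vals.append(cache_dict[cur]); cur += 1';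
-- fuel is only a totality guard: the loop runs at most |keys| times (cur strictly
-- increases and each visited cur is a distinct key), so fuel = |keys| + 1 is exact.
def pvWhile (d : PySem.Dict Int Int) : Nat → Int → List Int → List Int × Int
  | 0, cur, vals => (vals, cur)
  | fuel + 1, cur, vals =>
    if d.contains cur then pvWhile d fuel (cur + 1) (vals ++ [d.getD cur 0])
    else (vals, cur)

def pack_register_cache_alt (cache_dict : List (Int × Int)) : List (Int × Int × List Int) :=
  let d := PySem.Dict.ofList cache_dict
  let starts := PySem.List.sorted (d.keys.filter (fun x => !(d.contains (x - 1)))) (fun x => x) false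
  starts.foldl
    (fun packets a =>
      packets ++ [(a, (pvWhile d (d.keys.length + 1) a []).2 - a,
                      (pvWhile d (d.keys.length + 1) a []).1)]) []

-- ===== PRECONDITION & SPEC =====
def Spec_pack_register_cache (cache_dict : List (Int × Int)) (out : List (Int × Int × List Int)) : Prop := out = pack_register_cache_alt cache_dict
instance (cache_dict : List (Int × Int)) (out : List (Int × Int × List Int)) : Decidable (Spec_pack_register_cache cache_dict out) := by unfold Spec_pack_register_cache; infer_instance

-- ===== CLAIM (what is proved, stated in full; the proofs are below) =====
def Claim_equal_pack_register_cache : Prop := ∀ (cache_dict : List (Int × Int)), Dom_pack_register_cache cache_dict → Spec_pack_register_cache cache_dict (pack_register_cache cache_dict)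

-- ===== LEMMAS AND PROOFS =====

-- maximal prefix prev+1, prev+2, … of a list, and the remainder
def pvChain : Int → List Int → List Int × List Int
  | _, [] => ([], [])
  | prev, b :: t =>
    if b = prev + 1 then
      let r := pvChain b t
      (b :: r.1, r.2)
    else ([], b :: t)

theorem pvChain_snd_le (t : List Int) : ∀ prev : Int, (pvChain prev t).2.length ≤ t.length := by
  induction t with
  | nil => intro prev; simp [pvChain]
  | cons b t ih =>
    intro prev
    simp only [pvChain]
    split
    · exact le_trans (ih b) (Nat.le_succ _)
    · simp

-- canonical grouping into maximal consecutive runs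
def pvGroups : List Int → List (List Int)
  | [] => []
  | a :: t => (a :: (pvChain a t).1) :: pvGroups (pvChain a t).2
termination_by l => l.length
decreasing_by
  simp only [List.length_cons]
  exact Nat.lt_succ_of_le (pvChain_snd_le _ _)

def pvFlush (d : PySem.Dict Int Int) (run : List Int) : Int × Int × List Int :=
  (run.headD 0, (run.length : Int), run.map (fun x => PySem.Dict.getD d x 0))

theorem pv_take_drop_enum (t : List Int) : ∀ (s prev : Int),
    ((PySem.List.enumerate t s).takeWhile (fun p => p.1 - p.2 == s - (prev + 1))).map (·.2)
        = (pvChain prev t).1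
    ∧ (PySem.List.enumerate t s).dropWhile (fun p => p.1 - p.2 == s - (prev + 1))
        = PySem.List.enumerate (pvChain prev t).2 (s + ((pvChain prev t).1.length : Int)) := by
  induction t with
  | nil => intro s prev; simp [pvChain, PySem.List.enumerate_nil]
  | cons b t ih =>
    intro s prev
    rw [PySem.List.enumerate_cons]
    by_cases hb : b = prev + 1
    · subst hb
      obtain ⟨ih1, ih2⟩ := ih (s + 1) (prev + 1)
      have hfun : (fun p : Int × Int => p.1 - p.2 == s - (prev + 1))
          = (fun p : Int × Int => p.1 - p.2 == (s + 1) - (prev + 1 + 1)) := by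
        funext p; congr 1; ring
      have hc : ((s : Int) - (prev + 1) == s - (prev + 1)) = true := by simp
      have hch : pvChain prev ((prev + 1) :: t)
          = ((prev + 1) :: (pvChain (prev + 1) t).1, (pvChain (prev + 1) t).2) := by
        simp [pvChain]
      constructor
      · rw [List.takeWhile_cons]
        simp only [hc, if_true, List.map_cons, hch]
        rw [hfun, ih1]
      · rw [List.dropWhile_cons]
        simp only [hc, if_true, hch]
        rw [hfun, ih2]
        congr 1
        simp only [List.length_cons]
        push_cast
        ring
    · have hc : ((s : Int) - b == s - (prev + 1)) = false := by
        simp only [beq_eq_false_iff_ne, ne_eq]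
        omega
      have hch : pvChain prev (b :: t) = ([], b :: t) := by
        simp [pvChain, hb]
      rw [List.takeWhile_cons, List.dropWhile_cons]
      simp only [hc, Bool.false_eq_true, if_false, hch, List.map_nil, List.length_nil]
      exact ⟨trivial, by simp [PySem.List.enumerate_cons]⟩

theorem pvGroupby_enum (l : List Int) : ∀ s : Int,
    pvGroupby (PySem.List.enumerate l s) = pvGroups l := by
  induction hn : l.length using Nat.strong_induction_on generalizing l with
  | _ n ih =>
    intro s
    match l with
    | [] => simp [PySem.List.enumerate_nil, pvGroupby, pvGroups]
    | a :: t =>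
      rw [PySem.List.enumerate_cons, pvGroups]
      rw [pvGroupby]
      obtain ⟨h1, h2⟩ := pv_take_drop_enum t (s + 1) a
      have hpred : (fun (p : Int × Int) => p.1 - p.2 == s - a)
          = (fun (p : Int × Int) => p.1 - p.2 == (s + 1) - (a + 1)) := by
        funext p; congr 1; ring
      rw [hpred, h1, h2, ih (pvChain a t).2.length (by
          subst hn
          simp only [List.length_cons]
          exact Nat.lt_succ_of_le (pvChain_snd_le t a)) _ rfl]

-- structural facts about pvChain
theorem pvChain_parts (t : List Int) : ∀ prev : Int,
    (pvChain prev t).1 ++ (pvChain prev t).2 = t := by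
  induction t with
  | nil => intro prev; simp [pvChain]
  | cons b t ih =>
    intro prev
    simp only [pvChain]
    split
    · simpa using ih b
    · simp

theorem pvChain_mem (t : List Int) : ∀ prev : Int, ∀ x ∈ (pvChain prev t).1,
    (prev < x ∧ x ≤ prev + ((pvChain prev t).1.length : Int))
      ∧ (x = prev + 1 ∨ x - 1 ∈ (pvChain prev t).1) := by
  induction t with
  | nil => intro prev x hx; simp [pvChain] at hx
  | cons b t ih =>
    intro prev x hx
    by_cases hb : b = prev + 1
    · subst hb
      have hch : pvChain prev ((prev + 1) :: t)
          = ((prev + 1) :: (pvChain (prev + 1) t).1, (pvChain (prev + 1) t).2) := by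
        simp [pvChain]
      rw [hch] at hx ⊢
      simp only [List.mem_cons] at hx
      rcases hx with rfl | hx
      · refine ⟨⟨by omega, ?_⟩, Or.inl rfl⟩
        simp only [List.length_cons]; push_cast; omega
      · obtain ⟨⟨h1, h2⟩, h3⟩ := ih (prev + 1) x hx
        refine ⟨⟨by omega, ?_⟩, ?_⟩
        · simp only [List.length_cons]; push_cast at h2 ⊢; omega
        · rcases h3 with h3 | h3
          · exact Or.inr (by simp [h3])
          · exact Or.inr (by simp [h3])
    · have hch : pvChain prev (b :: t) = ([], b :: t) := by simp [pvChain, hb]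
      rw [hch] at hx
      simp at hx

theorem pvChain_rest_lb (t : List Int) : ∀ prev : Int,
    t.Pairwise (· < ·) → (∀ y ∈ t, prev < y) →
    ∀ y ∈ (pvChain prev t).2, prev + ((pvChain prev t).1.length : Int) + 2 ≤ y := by
  induction t with
  | nil => intro prev _ _ y hy; simp [pvChain] at hy
  | cons b t ih =>
    intro prev hp hgt y hy
    by_cases hb : b = prev + 1
    · subst hb
      have hch : pvChain prev ((prev + 1) :: t)
          = ((prev + 1) :: (pvChain (prev + 1) t).1, (pvChain (prev + 1) t).2) := by
        simp [pvChain]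
      rw [hch] at hy ⊢
      have := ih (prev + 1) (List.Pairwise.of_cons hp)
        (fun z hz => (List.pairwise_cons.mp hp).1 z hz) y hy
      simp only [List.length_cons]
      push_cast at this ⊢
      omega
    · have hch : pvChain prev (b :: t) = ([], b :: t) := by simp [pvChain, hb]
      rw [hch] at hy ⊢
      have hb' : prev < b := hgt b (by simp)
      simp only [List.mem_cons] at hy
      simp only [List.length_nil]
      rcases hy with rfl | hy
      · omega
      · have : b < y := (List.pairwise_cons.mp hp).1 y hy
        omega

-- the while loop stops immediately when cur is not a key
theorem pvWhile_stop (d : PySem.Dict Int Int) (cur : Int) (vals : List Int)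
    (h : d.contains cur = false) : ∀ fuel : Nat, pvWhile d fuel cur vals = (vals, cur) := by
  intro fuel
  cases fuel with
  | zero => simp [pvWhile]
  | succ n => simp [pvWhile, h]

-- the while loop from a key a collects exactly the maximal chain a :: pvChain a t
theorem pvWhile_chain (d : PySem.Dict Int Int) (t : List Int) : ∀ (fuel : Nat) (a : Int)
    (vals : List Int),
    t.Pairwise (· < ·) → (∀ y ∈ t, a < y) →
    (∀ v, a < v → (d.contains v = true ↔ v ∈ t)) →
    d.contains a = true → t.length < fuel →
    pvWhile d fuel a vals
      = (vals ++ (a :: (pvChain a t).1).map (fun x => PySem.Dict.getD d x 0),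
         a + 1 + ((pvChain a t).1.length : Int)) := by
  induction t with
  | nil =>
    intro fuel a vals _ _ hm ha hf
    match fuel, hf with
    | n + 1, _ =>
      simp only [pvWhile, ha, if_true]
      have h1 : d.contains (a + 1) = false := by
        by_contra h
        have := (hm (a + 1) (by omega)).mp (by revert h; cases d.contains (a+1) <;> simp)
        simp at this
      rw [pvWhile_stop d _ _ h1]
      simp [pvChain]
  | cons b t ih =>
    intro fuel a vals hp hgt hm ha hf
    match fuel, hf with
    | n + 1, hf =>
      simp only [pvWhile, ha, if_true]
      by_cases hb : b = a + 1
      · subst hb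
        have hch : pvChain a ((a + 1) :: t)
            = ((a + 1) :: (pvChain (a + 1) t).1, (pvChain (a + 1) t).2) := by
          simp [pvChain]
        rw [ih n (a + 1) _ (List.Pairwise.of_cons hp)
          (fun z hz => (List.pairwise_cons.mp hp).1 z hz)
          (fun v hv => by
            rw [hm v (by omega)]
            simp only [List.mem_cons]
            constructor
            · rintro (rfl | h)
              · omega
              · exact h
            · exact Or.inr)
          ((hm (a + 1) (by omega)).mpr (by simp))
          (by simpa using Nat.lt_of_succ_lt_succ hf)]
        rw [hch]
        refine Prod.ext (by simp) ?_
        simp only [List.length_cons]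
        push_cast
        ring
      · have hch : pvChain a (b :: t) = ([], b :: t) := by simp [pvChain, hb]
        have hb' : a < b := hgt b (by simp)
        have h1 : d.contains (a + 1) = false := by
          by_contra h
          have hmem := (hm (a + 1) (by omega)).mp (by revert h; cases d.contains (a+1) <;> simp)
          simp only [List.mem_cons] at hmem
          rcases hmem with h' | h'
          · omega
          · have := (List.pairwise_cons.mp hp).1 _ h'; omega
        rw [pvWhile_stop d _ _ h1, hch]
        simp

-- main correspondence: filtering the run starts out of a strictly sorted key list and
-- growing each by membership produces exactly the flush of each maximal consecutive group
theorem pv_main (d : PySem.Dict Int Int) (fuel : Nat) :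
    ∀ (R : List Int) (lb : Int),
    R.Pairwise (· < ·) →
    (∀ v, lb ≤ v → (d.contains v = true ↔ v ∈ R)) →
    (∀ y ∈ R, lb < y) →
    R.length < fuel →
    (R.filter (fun x => !(d.contains (x - 1)))).map
        (fun a => (a, (pvWhile d fuel a []).2 - a, (pvWhile d fuel a []).1))
      = (pvGroups R).map (pvFlush d) := by
  intro R
  induction hn : R.length using Nat.strong_induction_on generalizing R with
  | _ n ih =>
    intro lb hp hm hlb hf
    match R with
    | [] => simp [pvGroups]
    | a :: t =>
      have hparts := pvChain_parts t a
      have hgt : ∀ y ∈ t, a < y := fun z hz => (List.pairwise_cons.mp hp).1 z hz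
      have hla : lb < a := hlb a (by simp)
      -- a survives the filter
      have hfa : d.contains (a - 1) = false := by
        by_contra h
        have hmem := (hm (a - 1) (by omega)).mp (by revert h; cases d.contains (a-1) <;> simp)
        simp only [List.mem_cons] at hmem
        rcases hmem with h' | h'
        · omega
        · have := hgt _ h'; omega
      -- every chain element is filtered out
      have hfc : ∀ x ∈ (pvChain a t).1, d.contains (x - 1) = true := by
        intro x hx
        obtain ⟨⟨h1, _⟩, h3⟩ := pvChain_mem t a x hx
        apply (hm (x - 1) (by omega)).mpr
        rcases h3 with h3 | h3
        · simp [h3]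
        · have : x - 1 ∈ t := by rw [← hparts]; exact List.mem_append_left _ h3
          simp [this]
      -- split t as chain ++ rest and compute the filter
      have hnil : (pvChain a t).1.filter (fun x => !(d.contains (x - 1))) = [] := by
        rw [List.filter_eq_nil_iff]
        intro x hx
        simp [hfc x hx]
      have hfilter : (a :: t).filter (fun x => !(d.contains (x - 1)))
          = a :: (pvChain a t).2.filter (fun x => !(d.contains (x - 1))) := by
        rw [List.filter_cons]
        simp only [hfa, Bool.not_false, if_true]
        congr 1
        conv_lhs => rw [← hparts]
        rw [List.filter_append, hnil, List.nil_append]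
      have hch := pvWhile_chain d t fuel a [] (List.Pairwise.of_cons hp) hgt
        (fun v hv => by
          rw [hm v (by omega)]
          simp only [List.mem_cons]
          constructor
          · rintro (rfl | h)
            · omega
            · exact h
          · exact Or.inr)
        ((hm a (by omega)).mpr (by simp))
        (by simp only [List.length_cons] at hn; omega)
      -- recursion on the rest
      have hrest_lb := pvChain_rest_lb t a (List.Pairwise.of_cons hp) hgt
      have hchain_le : ∀ x ∈ (pvChain a t).1, x ≤ a + ((pvChain a t).1.length : Int) :=
        fun x hx => (pvChain_mem t a x hx).1.2
      have hrlen : (pvChain a t).2.length ≤ t.length := pvChain_snd_le t a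
      have hrec := ih (pvChain a t).2.length
        (by subst hn; simp only [List.length_cons]; omega)
        (pvChain a t).2 rfl (a + ((pvChain a t).1.length : Int) + 1)
        (by
          have : t.Pairwise (· < ·) := List.Pairwise.of_cons hp
          rw [← hparts] at this
          exact (List.pairwise_append.mp this).2.1)
        (by
          intro v hv
          rw [hm v (by omega)]
          constructor
          · intro hvR
            rcases List.mem_cons.mp hvR with rfl | h
            · omega
            · rw [← hparts] at h
              rcases List.mem_append.mp h with h | h
              · have := hchain_le v h; omega
              · exact h
          · intro h
            refine List.mem_cons_of_mem _ ?_
            rw [← hparts]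
            exact List.mem_append_right _ h)
        (fun y hy => by have := hrest_lb y hy; omega)
        (by simp only [List.length_cons] at hn; omega)
      rw [hfilter, List.map_cons, hrec, pvGroups, List.map_cons]
      congr 1
      simp only [hch, pvFlush, List.nil_append]
      refine Prod.ext rfl (Prod.ext ?_ rfl)
      simp only [List.length_cons]
      push_cast
      ring

-- ===== VERDICT (by name: the statement is the Claim_ definition above) =====
theorem pack_register_cache_spec : Claim_equal_pack_register_cache := by
  intro cache_dict _
  unfold Spec_pack_register_cache pack_register_cache pack_register_cache_alt
  simp only [PySem.List.foldl_append_singleton_eq_map, List.nil_append]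
  set d := PySem.Dict.ofList cache_dict with hd
  set L := PySem.List.sorted d.keys (fun x => x) false with hL
  -- strict sortedness of L
  have hnodupK : d.keys.Nodup := PySem.Dict.nodup_keys_ofList cache_dict
  have hperm : L.Perm d.keys := PySem.List.sorted_perm d.keys (fun x => x) false
  have hnodup : L.Nodup := (hperm.nodup_iff).mpr hnodupK
  have hle : L.Pairwise (fun a b : Int => a ≤ b) := by
    have := PySem.List.sorted_pairwise d.keys (fun x : Int => x) (κ := Int)
    simpa using this
  have hlt : L.Pairwise (fun a b : Int => a < b) :=
    (hle.and hnodup).imp (fun h => lt_of_le_of_ne h.1 h.2)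
  -- the sorted filtered starts are the filter of the sorted list
  have hstarts : PySem.List.sorted (d.keys.filter (fun x => !(d.contains (x - 1))))
      (fun x => x) false = L.filter (fun x => !(d.contains (x - 1))) := by
    apply PySem.List.sorted_eq_of_perm_of_pairwise_lt
    · exact hperm.filter _
    · exact hlt.filter _
  -- A's side: groupby over the enumerated sorted list is the canonical grouping
  rw [pvGroupby_enum L 0, hstarts]
  -- B's side: the main correspondence
  have hmemL : ∀ v : Int, d.contains v = true ↔ v ∈ L := by
    intro v
    rw [PySem.Dict.contains_iff_mem_keys]
    exact (hperm.mem_iff).symm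
  have hlen : L.length = d.keys.length := hperm.length_eq
  match hLc : L with
  | [] => simp [pvGroups]
  | a :: t =>
    have hlt' : (a :: t).Pairwise (fun x y : Int => x < y) := hLc ▸ hlt
    have hmain := pv_main d (d.keys.length + 1) (a :: t) (a - 1)
      hlt'
      (fun v _ => hLc ▸ hmemL v)
      (by
        intro y hy
        rcases List.mem_cons.mp hy with rfl | h
        · omega
        · have : a < y := (List.pairwise_cons.mp hlt').1 y h
          omega)
      (by rw [hlen]; omega)
    simpa only [pvFlush] using hmain.symm
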